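-- pv_equiv track=rewrite | github.com/JoeKoss/Connect4 | connect4.py | checkForUpVertical
-- ===== SOURCE A (Python) =====
-- def checkForUpVertical(row, col, n, symbol, tBoard):
-- 	if row - 1 >= 0:
-- 		if tBoard[row-1][col] != symbol:
-- 			return n
-- 		else:
-- 			return 5 + checkForUpVertical(row - 1, col, n, symbol, tBoard)
-- 	else:
-- 		return n
-- ===== SOURCE B (Python) =====
-- def checkForUpVertical(row, col, n, symbol, tBoard):
-- 	while row - 1 >= 0 and tBoard[row - 1][col] == symbol:
-- 		n += 5
-- 		row -= 1
-- 	return n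
-- ===== Notes on version B (the rewrite author's own statement) =====
-- stated objective: simpler
-- what changed: Replaced the recursion (which rebuilds the sum as 5 + 5 + ... + n on the way back up) by a single iterative while loop with a mutable row index and accumulator n.
-- outside the precondition, e.g. on checkForUpVertical(2, 1, 0, 'z', [['a'], ['b', 'c']]): A returns 0, B returns 0
import Mathlib
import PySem

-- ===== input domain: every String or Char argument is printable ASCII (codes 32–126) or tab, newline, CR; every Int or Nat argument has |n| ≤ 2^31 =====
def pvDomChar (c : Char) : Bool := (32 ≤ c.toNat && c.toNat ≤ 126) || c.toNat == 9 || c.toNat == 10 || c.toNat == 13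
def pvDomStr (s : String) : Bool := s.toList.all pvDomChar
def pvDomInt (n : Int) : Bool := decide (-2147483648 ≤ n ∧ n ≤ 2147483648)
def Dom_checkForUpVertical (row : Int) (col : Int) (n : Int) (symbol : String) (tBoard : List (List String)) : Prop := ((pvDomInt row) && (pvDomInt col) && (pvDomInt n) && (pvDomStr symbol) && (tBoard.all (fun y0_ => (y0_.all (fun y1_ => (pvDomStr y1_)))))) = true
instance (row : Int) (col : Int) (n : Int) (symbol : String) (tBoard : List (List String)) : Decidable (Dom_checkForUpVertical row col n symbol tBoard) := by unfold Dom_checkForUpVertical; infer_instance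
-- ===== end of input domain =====

-- B replaces A's recursion by a single iterative while loop with an accumulator (objective: simpler).

-- ===== PORT A =====
-- Literal port of A's recursion; where Python raises IndexError (pyGet? = none,
-- excluded by Pre_) the port returns n.
def checkForUpVertical (row : Int) (col : Int) (n : Int) (symbol : String) (tBoard : List (List String)) : Int :=
  if _h : row - 1 ≥ 0 then
    match PySem.List.pyGet? tBoard (row - 1) >>= fun r => PySem.List.pyGet? r col with
    | none => n
    | some v =>
      if v ≠ symbol then n
      else 5 + checkForUpVertical (row - 1) col n symbol tBoard
  else n
termination_by row.toNat
decreasing_by omega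

-- ===== PORT B =====
-- Literal port of B's while loop: state is (row, n); where Python raises
-- (pyGet? = none, excluded by Pre_) the port returns the accumulator n.
def checkForUpVertical_altLoop (col : Int) (symbol : String) (tBoard : List (List String)) (row : Int) (n : Int) : Int :=
  if _h : row - 1 ≥ 0 then
    match PySem.List.pyGet? tBoard (row - 1) >>= fun r => PySem.List.pyGet? r col with
    | none => n
    | some v =>
      if v == symbol then checkForUpVertical_altLoop col symbol tBoard (row - 1) (n + 5)
      else n
  else n
termination_by row.toNat
decreasing_by omega

def checkForUpVertical_alt (row : Int) (col : Int) (n : Int) (symbol : String) (tBoard : List (List String)) : Int :=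
  checkForUpVertical_altLoop col symbol tBoard row n

-- ===== PRECONDITION & SPEC =====
-- Pre_ excludes the inputs where the upward scan can reach an out-of-range cell and
-- Python raises IndexError; it is slightly narrower than A's exact return set (it also
-- excludes inputs where a mismatch happens to stop the scan before an invalid access,
-- on which A and B both still return n — see the cite in claim.json).
def Pre_checkForUpVertical (row : Int) (col : Int) (n : Int) (symbol : String) (tBoard : List (List String)) : Prop :=
  row ≤ tBoard.length ∧ ∀ l ∈ tBoard.take row.toNat, PySem.Raise.InRange l.length col
instance (row : Int) (col : Int) (n : Int) (symbol : String) (tBoard : List (List String)) : Decidable (Pre_checkForUpVertical row col n symbol tBoard) := by unfold Pre_checkForUpVertical; infer_instance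

def pvWitness_checkForUpVertical : Int × Int × Int × String × List (List String) := (1, 0, 0, "x", [["x"]])

def Spec_checkForUpVertical (row : Int) (col : Int) (n : Int) (symbol : String) (tBoard : List (List String)) (out : Int) : Prop := out = checkForUpVertical_alt row col n symbol tBoard
instance (row : Int) (col : Int) (n : Int) (symbol : String) (tBoard : List (List String)) (out : Int) : Decidable (Spec_checkForUpVertical row col n symbol tBoard out) := by unfold Spec_checkForUpVertical; infer_instance

-- ===== CLAIM (what is proved, stated in full; the proofs are below) =====
def Claim_equal_checkForUpVertical : Prop := ∀ (row : Int) (col : Int) (n : Int) (symbol : String) (tBoard : List (List String)), Dom_checkForUpVertical row col n symbol tBoard → Pre_checkForUpVertical row col n symbol tBoard → Spec_checkForUpVertical row col n symbol tBoard (checkForUpVertical row col n symbol tBoard)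

-- ===== LEMMAS AND PROOFS =====

-- The loop accumulator distributes: running B's loop from n + 5 is 5 plus running it from n.
theorem altLoop_add_five (col : Int) (symbol : String) (tBoard : List (List String)) (row : Int) (n : Int) :
    checkForUpVertical_altLoop col symbol tBoard row (n + 5) = 5 + checkForUpVertical_altLoop col symbol tBoard row n := by
  induction hk : row.toNat generalizing row n with
  | zero =>
    conv_lhs => rw [checkForUpVertical_altLoop]
    conv_rhs => rw [checkForUpVertical_altLoop]
    rw [dif_neg (by omega : ¬ row - 1 ≥ 0), dif_neg (by omega : ¬ row - 1 ≥ 0)]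
    omega
  | succ k ih =>
    conv_lhs => rw [checkForUpVertical_altLoop]
    conv_rhs => rw [checkForUpVertical_altLoop]
    by_cases h : row - 1 ≥ 0
    · rw [dif_pos h, dif_pos h]
      cases (PySem.List.pyGet? tBoard (row - 1) >>= fun r => PySem.List.pyGet? r col) with
      | none => dsimp only; omega
      | some v =>
        dsimp only
        by_cases hv : (v == symbol) = true
        · rw [if_pos hv, if_pos hv]
          exact ih (row - 1) (n + 5) (by omega)
        · rw [if_neg hv, if_neg hv]
          omega
    · rw [dif_neg h, dif_neg h]
      omega

-- A's recursion equals B's loop, for every input (both ports resolve the raising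
-- case compatibly: both return n there).
theorem rec_eq_loop (col : Int) (symbol : String) (tBoard : List (List String)) (row : Int) (n : Int) :
    checkForUpVertical row col n symbol tBoard = checkForUpVertical_altLoop col symbol tBoard row n := by
  induction hk : row.toNat generalizing row with
  | zero =>
    rw [checkForUpVertical, checkForUpVertical_altLoop]
    rw [dif_neg (by omega : ¬ row - 1 ≥ 0), dif_neg (by omega : ¬ row - 1 ≥ 0)]
  | succ k ih =>
    conv_lhs => rw [checkForUpVertical]
    conv_rhs => rw [checkForUpVertical_altLoop]
    by_cases h : row - 1 ≥ 0
    · rw [dif_pos h, dif_pos h]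
      cases (PySem.List.pyGet? tBoard (row - 1) >>= fun r => PySem.List.pyGet? r col) with
      | none => rfl
      | some v =>
        dsimp only
        by_cases hv : v = symbol
        · rw [if_neg (by simp [hv]), if_pos (by simp [hv])]
          rw [ih (row - 1) (by omega), altLoop_add_five]
        · rw [if_pos hv, if_neg (by simp [hv])]
    · rw [dif_neg h, dif_neg h]

-- ===== VERDICT (by name: the statement is the Claim_ definition above) =====
theorem checkForUpVertical_spec : Claim_equal_checkForUpVertical := by
  intro row col n symbol tBoard _ _
  unfold Spec_checkForUpVertical checkForUpVertical_alt
  exact rec_eq_loop col symbol tBoard row n
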